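-- pv_equiv track=rewrite | github.com/walisson-silva-ada/wrurururu-logica-de-programacao | makoto_black_jack_amigo_secreto/blackjack.py | encontra_vencedor
-- ===== SOURCE A (Python) =====
-- def encontra_vencedor(jogo):
--     melhor_pontuacao = -1
--     vencedores = []
--
--     for nome, jogador in jogo["jogadores"].items():
--         pontos = jogador["pontos"]
--         if pontos <= 21:
--             if jogador["pontos"] > melhor_pontuacao:
--                 melhor_pontuacao = jogador["pontos"]
--                 vencedores = [nome]
--             elif jogador["pontos"] == melhor_pontuacao:
--                 vencedores.append(nome)
--
--     return vencedores
-- ===== SOURCE B (Python) =====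
-- def encontra_vencedor(jogo):
--     itens = [(nome, jogador["pontos"]) for nome, jogador in jogo["jogadores"].items()]
--     melhor = max([-1] + [p for _, p in itens if p <= 21])
--     return [nome for nome, p in itens if p == melhor]
-- ===== Notes on version B (the rewrite author's own statement) =====
-- stated objective: alternative
-- what changed: Replaces A's fused single-pass best-score/tie-list state machine with three stateless comprehension passes: project every player to (name, score), take melhor = max over [-1] plus the scores <= 21, and collect the names whose score equals melhor; Pre_ excludes inputs where a dict lookup raises KeyError (missing 'jogadores' or a player's 'pontos') and association lists with duplicate keys, which cannot arise from a real Python dict.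
-- outside the precondition, e.g. on encontra_vencedor({}): A raises KeyError, B raises KeyError
import Mathlib
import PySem

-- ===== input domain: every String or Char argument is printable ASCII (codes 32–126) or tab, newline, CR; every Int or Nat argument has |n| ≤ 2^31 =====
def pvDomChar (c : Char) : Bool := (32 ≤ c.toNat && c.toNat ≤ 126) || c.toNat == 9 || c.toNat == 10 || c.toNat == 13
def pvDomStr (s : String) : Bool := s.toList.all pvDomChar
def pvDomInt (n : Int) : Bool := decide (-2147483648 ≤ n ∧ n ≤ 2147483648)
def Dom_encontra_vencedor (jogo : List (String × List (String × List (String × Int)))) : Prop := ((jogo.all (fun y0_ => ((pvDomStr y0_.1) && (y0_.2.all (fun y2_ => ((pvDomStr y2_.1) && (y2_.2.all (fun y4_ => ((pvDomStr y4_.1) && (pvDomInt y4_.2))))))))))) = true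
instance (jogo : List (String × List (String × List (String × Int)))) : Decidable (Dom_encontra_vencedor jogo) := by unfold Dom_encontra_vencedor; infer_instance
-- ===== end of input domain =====

-- B replaces A's fused single-pass best/ties state machine by three stateless passes
-- (project to (name, score) → max over [-1]+scores≤21 → collect names equal to it); same O(n) cost.

-- ===== PORT A =====
-- A's for-loop over jogo["jogadores"].items() carrying the mutable state (melhor_pontuacao, vencedores);
-- the `none` branches are dict lookups where Python raises KeyError (outside Pre_).
def encontraA_loop (melhor : Int) (venc : List String) :
    List (String × List (String × Int)) → List String
  | [] => venc
  | (nome, jogador) :: rest =>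
    match (PySem.Dict.mk jogador).get? "pontos" with
    | none => []  -- KeyError: excluded by Pre_
    | some pontos =>
      if pontos ≤ 21 then
        if melhor < pontos then encontraA_loop pontos [nome] rest
        else if pontos = melhor then encontraA_loop melhor (venc ++ [nome]) rest
        else encontraA_loop melhor venc rest
      else encontraA_loop melhor venc rest

def encontra_vencedor (jogo : List (String × List (String × List (String × Int)))) : List String :=
  match (PySem.Dict.mk jogo).get? "jogadores" with
  | none => []  -- KeyError: excluded by Pre_
  | some jogadores => encontraA_loop (-1) [] jogadores

-- ===== PORT B =====
-- itens = [(nome, jogador["pontos"]) for ...]; `.getD 0` stands where Python raises KeyError (outside Pre_).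
def itensB (js : List (String × List (String × Int))) : List (String × Int) :=
  js.map (fun q => (q.1, ((PySem.Dict.mk q.2).get? "pontos").getD 0))

def encontra_vencedor_alt (jogo : List (String × List (String × List (String × Int)))) : List String :=
  match (PySem.Dict.mk jogo).get? "jogadores" with
  | none => []  -- KeyError: excluded by Pre_
  | some jogadores =>
    let itens := itensB jogadores
    -- melhor = max([-1] + [p for _, p in itens if p <= 21])
    let melhor := ((itens.filter (fun c => c.2 ≤ 21)).map Prod.snd).foldl max (-1)
    -- [nome for nome, p in itens if p == melhor]
    (itens.filter (fun c => c.2 == melhor)).map Prod.fst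

-- ===== PRECONDITION & SPEC =====
-- Pre_ excludes inputs where a Python dict lookup raises KeyError (no "jogadores" key, or a player
-- without a "pontos" key) and association lists with duplicate keys at any level, which cannot arise
-- from a real Python dict (dict construction would collapse them, so the list does not represent A's input).
def Pre_encontra_vencedor (jogo : List (String × List (String × List (String × Int)))) : Prop :=
  (jogo.map Prod.fst).Nodup ∧
  "jogadores" ∈ jogo.map Prod.fst ∧
  ∀ p ∈ jogo, p.1 = "jogadores" →
    ((p.2.map Prod.fst).Nodup ∧
     ∀ q ∈ p.2, ((q.2.map Prod.fst).Nodup ∧ "pontos" ∈ q.2.map Prod.fst))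
instance (jogo : List (String × List (String × List (String × Int)))) : Decidable (Pre_encontra_vencedor jogo) := by unfold Pre_encontra_vencedor; infer_instance

def pvWitness_encontra_vencedor : (List (String × List (String × List (String × Int)))) :=
  [("jogadores", [("ana", [("pontos", 20)]), ("bia", [("pontos", 20)]), ("carlos", [("pontos", 25)])])]

def Spec_encontra_vencedor (jogo : List (String × List (String × List (String × Int)))) (out : List String) : Prop := out = encontra_vencedor_alt jogo
instance (jogo : List (String × List (String × List (String × Int)))) (out : List String) : Decidable (Spec_encontra_vencedor jogo out) := by unfold Spec_encontra_vencedor; infer_instance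

-- ===== CLAIM (what is proved, stated in full; the proofs are below) =====
def Claim_equal_encontra_vencedor : Prop := ∀ (jogo : List (String × List (String × List (String × Int)))), Dom_encontra_vencedor jogo → Pre_encontra_vencedor jogo → Spec_encontra_vencedor jogo (encontra_vencedor jogo)

-- ===== LEMMAS AND PROOFS =====

-- A's fused loop, on a player list whose "pontos" lookups all succeed, equals
-- "max-update then collect" over the ≤21-filtered projection of B's itens list.
theorem encontraA_loop_eq (js : List (String × List (String × Int)))
    (h : ∀ q ∈ js, "pontos" ∈ q.2.map Prod.fst) :
    ∀ (melhor : Int) (venc : List String),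
      encontraA_loop melhor venc js =
        (let cs := (itensB js).filter (fun c => c.2 ≤ 21)
         let M := (cs.map Prod.snd).foldl max melhor
         if M = melhor then venc ++ (cs.filter (fun c => c.2 == melhor)).map Prod.fst
         else (cs.filter (fun c => c.2 == M)).map Prod.fst) := by
  induction js with
  | nil => intro melhor venc; simp [encontraA_loop, itensB]
  | cons hd tl ih =>
    intro melhor venc
    obtain ⟨nome, jogador⟩ := hd
    have hhd : "pontos" ∈ jogador.map Prod.fst := h (nome, jogador) (by simp)
    have htl : ∀ q ∈ tl, "pontos" ∈ q.2.map Prod.fst := fun q hq => h q (by simp [hq])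
    obtain ⟨p, hp⟩ : ∃ p, (PySem.Dict.mk jogador).get? "pontos" = some p := by
      rcases ho : (PySem.Dict.mk jogador).get? "pontos" with _ | p
      · exact absurd ((PySem.Dict.get?_eq_none_iff_not_mem_keys _ _).1 ho)
          (by simp [PySem.Dict.keys_mk, hhd])
      · exact ⟨p, rfl⟩
    have hit : itensB ((nome, jogador) :: tl) = (nome, p) :: itensB tl := by
      simp [itensB, hp]
    simp only [encontraA_loop, hp, hit]
    by_cases h21 : p ≤ 21
    · rw [if_pos h21]
      rw [show ((nome, p) :: itensB tl).filter (fun c => c.2 ≤ 21)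
            = (nome, p) :: (itensB tl).filter (fun c => c.2 ≤ 21) by
          simp [h21]]
      set cs := (itensB tl).filter (fun c => c.2 ≤ 21) with hcs
      by_cases hgt : melhor < p
      · -- new best: state resets to (p, [nome])
        rw [if_pos hgt, ih htl p [nome]]
        have hle : p ≤ (cs.map Prod.snd).foldl max p :=
          (PySem.List.le_foldl_max (cs.map Prod.snd) p).1
        have hMax : max melhor p = p := max_eq_right (le_of_lt hgt)
        simp only [List.map_cons, List.foldl_cons, hMax]
        have hne : (cs.map Prod.snd).foldl max p ≠ melhor := by omega
        by_cases hM : (cs.map Prod.snd).foldl max p = p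
        · have hpm : p ≠ melhor := by omega
          simp [hM, hpm]
        · have hpn : p ≠ (cs.map Prod.snd).foldl max p := fun hEq => hM hEq.symm
          simp [hM, hne, hpn]
      · rw [if_neg hgt]
        have hle' : p ≤ melhor := le_of_not_gt hgt
        have hMax : max melhor p = melhor := max_eq_left hle'
        by_cases heq : p = melhor
        · -- tie with current best: append nome
          rw [if_pos heq, ih htl melhor (venc ++ [nome])]
          simp only [List.map_cons, List.foldl_cons, hMax]
          by_cases hM : (cs.map Prod.snd).foldl max melhor = melhor
          · simp [hM, heq, List.append_assoc]
          · have hne : melhor ≠ (cs.map Prod.snd).foldl max melhor :=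
              fun hEq => hM hEq.symm
            simp [hM, heq, hne]
        · -- strictly worse candidate: state unchanged, never equal to any later best
          rw [if_neg heq, ih htl melhor venc]
          simp only [List.map_cons, List.foldl_cons, hMax]
          have hge : melhor ≤ (cs.map Prod.snd).foldl max melhor :=
            (PySem.List.le_foldl_max (cs.map Prod.snd) melhor).1
          by_cases hM : (cs.map Prod.snd).foldl max melhor = melhor
          · simp [hM, heq]
          · have hlt : p < (cs.map Prod.snd).foldl max melhor := by omega
            have hne : p ≠ (cs.map Prod.snd).foldl max melhor := ne_of_lt hlt
            simp [hM, hne]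
    · -- busted (> 21): skipped by both
      rw [if_neg h21]
      rw [show ((nome, p) :: itensB tl).filter (fun c => c.2 ≤ 21)
            = (itensB tl).filter (fun c => c.2 ≤ 21) by
          simp [h21]]
      exact ih htl melhor venc

-- the running max over values ≤ 21 starting from a seed ≤ 21 stays ≤ 21
theorem foldl_max_le (l : List Int) : ∀ a : Int, a ≤ 21 → (∀ x ∈ l, x ≤ 21) →
    l.foldl max a ≤ 21 := by
  induction l with
  | nil => intro a ha _; simpa using ha
  | cons x xs ih =>
    intro a ha hx
    simp only [List.foldl_cons]
    exact ih (max a x) (max_le ha (hx x (by simp))) (fun y hy => hx y (by simp [hy]))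

-- ===== VERDICT (by name: the statement is the Claim_ definition above) =====
theorem encontra_vencedor_spec : Claim_equal_encontra_vencedor := by
  intro jogo _ hPre
  obtain ⟨hnd, hmem, hpl⟩ := hPre
  obtain ⟨⟨k, js⟩, hin, hk⟩ : ∃ p ∈ jogo, p.1 = "jogadores" := by simpa using hmem
  simp only at hk
  subst hk
  have hget : (PySem.Dict.mk jogo).get? "jogadores" = some js :=
    PySem.Dict.get?_of_mem_items (PySem.Dict.mk jogo) hin
      (by simpa [PySem.Dict.keys_mk] using hnd)
  obtain ⟨_, hq⟩ := hpl _ hin rfl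
  unfold Spec_encontra_vencedor encontra_vencedor encontra_vencedor_alt
  simp only [hget]
  rw [encontraA_loop_eq js (fun q hqm => (hq q hqm).2) (-1) []]
  set cs := (itensB js).filter (fun c => c.2 ≤ 21) with hcs
  set M := (cs.map Prod.snd).foldl max (-1 : Int) with hM
  have hM21 : M ≤ 21 := by
    refine foldl_max_le _ _ (by norm_num) ?_
    intro x hx
    obtain ⟨c, hc, hcx⟩ := List.mem_map.1 hx
    have := List.of_mem_filter hc
    simpa [hcx] using of_decide_eq_true this
  have hfilt : (itensB js).filter (fun c => c.2 == M) = cs.filter (fun c => c.2 == M) := by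
    rw [hcs, List.filter_filter]
    refine List.filter_congr ?_
    intro c _
    by_cases hcM : c.2 = M
    · simp [hcM, hM21]
    · simp [hcM]
  by_cases h0 : M = -1
  · rw [h0] at hfilt
    simp only [← hM, h0, List.nil_append, if_true, hfilt]
  · simp only [← hM, if_neg h0]
    rw [hfilt]
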